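-- pv_equiv track=rewrite | github.com/thunguyen19/advent-of-code-2020 | day1/day1.py | part_2
-- ===== SOURCE A (Python) =====
-- def part_2(entries, target):
--     entries = sorted(entries)
--     length = len(entries)
--     result = 0
--     for i in range(length):
--         low = i + 1
--         high = length - 1
--         if low >= length:
--             break
--         while low < high:
--             current = entries[i]
--             low_value, high_value = entries[low], entries[high]
--             total = current + low_value + high_value
--             if total == target:
--                 result = max(result, current * low_value * high_value)
--                 low += 1
--                 high -= 1
--             elif total < target:
--                 low += 1
--             else:
--                 high -= 1
--     return result
-- ===== SOURCE B (Python) =====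
-- def part_2(entries, target):
--     result = 0
--     rest = list(entries)
--     while rest:
--         x = rest.pop(0)
--         seen = set()
--         for y in rest:
--             c = target - x - y
--             if c in seen:
--                 result = max(result, x * y * c)
--             seen.add(y)
--     return result
-- ===== Notes on version B (the rewrite author's own statement) =====
-- stated objective: alternative
-- what changed: B drops the sort and the two-pointer convergence entirely: for each first element it scans the remaining values once, checking the complement target-x-y against a hash set of values seen so far and updating the running max product.
import Mathlib
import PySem

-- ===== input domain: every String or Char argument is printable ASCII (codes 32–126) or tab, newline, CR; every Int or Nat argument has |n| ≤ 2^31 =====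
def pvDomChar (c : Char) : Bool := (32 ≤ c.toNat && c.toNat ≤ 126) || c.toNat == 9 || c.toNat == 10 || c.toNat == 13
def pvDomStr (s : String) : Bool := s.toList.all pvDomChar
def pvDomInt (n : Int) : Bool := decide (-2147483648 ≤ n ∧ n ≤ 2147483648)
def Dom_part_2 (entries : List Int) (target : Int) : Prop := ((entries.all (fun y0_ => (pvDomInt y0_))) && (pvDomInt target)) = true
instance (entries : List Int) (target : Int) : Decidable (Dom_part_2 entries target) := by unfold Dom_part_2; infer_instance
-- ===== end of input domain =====

-- B replaces A's sort + two-pointer convergence by an unsorted scan that checks the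
-- complement (target - x - y) against a set of the values seen so far (alternative
-- algorithm of the same O(n^2) cost; no sorting).

-- ===== PORT A =====
-- the inner 'while low < high' loop of A
def part2While (s : List Int) (t i : Int) (low high res : Int) : Int :=
  if low < high then
    let current := PySem.List.pyGetD s i 0
    let lowValue := PySem.List.pyGetD s low 0
    let highValue := PySem.List.pyGetD s high 0
    let total := current + lowValue + highValue
    if total = t then
      part2While s t i (low + 1) (high - 1) (max res (current * lowValue * highValue))
    else if total < t then
      part2While s t i (low + 1) high res
    else
      part2While s t i low (high - 1) res
  else res
termination_by (high - low).toNat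
decreasing_by all_goals omega

-- 'for i in range(length)' with the 'if low >= length: break'
def part2Outer (s : List Int) (t L : Int) : List Int → Int → Int
  | [], res => res
  | i :: is, res =>
    let low := i + 1
    if low ≥ L then res
    else part2Outer s t L is (part2While s t i low (L - 1) res)

def part_2 (entries : List Int) (target : Int) : Int :=
  let s := PySem.List.sorted entries (fun x => x) false
  let length : Int := s.length
  part2Outer s target length (PySem.List.pyRange 0 length) 0

-- ===== PORT B =====
-- 'for y in rest' with the seen-set
def altInner (t x : Int) : List Int → PySem.Set Int → Int → Int
  | [], _, res => res
  | y :: ys, seen, res =>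
    let c := t - x - y
    let res' := if seen.contains c then max res (x * y * c) else res
    altInner t x ys (seen.add y) res'

-- 'while rest: x = rest.pop(0)'
def altOuter (t : Int) : List Int → Int → Int
  | [], res => res
  | x :: rest, res => altOuter t rest (altInner t x rest PySem.Set.empty res)

def part_2_alt (entries : List Int) (target : Int) : Int :=
  altOuter target entries 0

-- ===== PRECONDITION & SPEC =====
def Spec_part_2 (entries : List Int) (target : Int) (out : Int) : Prop := out = part_2_alt entries target
instance (entries : List Int) (target : Int) (out : Int) : Decidable (Spec_part_2 entries target out) := by unfold Spec_part_2; infer_instance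

-- ===== CLAIM (what is proved, stated in full; the proofs are below) =====
def Claim_equal_part_2 : Prop := ∀ (entries : List Int) (target : Int), Dom_part_2 entries target → Spec_part_2 entries target (part_2 entries target)

-- ===== LEMMAS AND PROOFS =====

-- fold-max toolkit -----------------------------------------------------------
theorem le_foldl_max (L : List Int) (r : Int) : r ≤ L.foldl max r := by
  induction L generalizing r with
  | nil => simp
  | cons y L ih => exact le_trans (le_max_left r y) (ih (max r y))

theorem mem_le_foldl_max (L : List Int) (r u : Int) (hu : u ∈ L) : u ≤ L.foldl max r := by
  induction L generalizing r with
  | nil => cases hu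
  | cons y L ih =>
    rcases List.mem_cons.mp hu with h | h
    · subst h; exact le_trans (le_max_right r u) (le_foldl_max L _)
    · exact ih _ h

theorem foldl_max_eq_or (L : List Int) (r : Int) : L.foldl max r = r ∨ L.foldl max r ∈ L := by
  induction L generalizing r with
  | nil => left; rfl
  | cons y L ih =>
    rcases ih (max r y) with h | h
    · rw [List.foldl_cons, h]
      rcases max_choice r y with h' | h'
      · left; exact h'
      · right; rw [h']; exact List.mem_cons_self
    · right; exact List.mem_cons_of_mem _ h

-- spec: the list of all candidate triple products ----------------------------
def mprods (t x y : Int) (pre : List Int) : List Int :=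
  pre.filterMap (fun v => if x + v + y = t then some (x * v * y) else none)

def minner (t x : Int) : List Int → List Int → List Int
  | _, [] => []
  | pre, y :: ys => mprods t x y pre ++ minner t x (pre ++ [y]) ys

def mtri (t : Int) : List Int → List Int
  | [] => []
  | x :: rest => minner t x [] rest ++ mtri t rest

theorem mem_mprods (t x y u : Int) (pre : List Int) :
    u ∈ mprods t x y pre ↔ ∃ v ∈ pre, x + v + y = t ∧ u = x * v * y := by
  simp only [mprods, List.mem_filterMap]
  constructor
  · rintro ⟨v, hv, h⟩
    by_cases hc : x + v + y = t
    · simp [hc] at h; exact ⟨v, hv, hc, h.symm⟩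
    · simp [hc] at h
  · rintro ⟨v, hv, hc, hu⟩
    exact ⟨v, hv, by simp [hc, hu]⟩

theorem mprods_foldl (t x y : Int) (pre : List Int) (res : Int) :
    (mprods t x y pre).foldl max res =
      if (t - x - y) ∈ pre then max res (x * (t - x - y) * y) else res := by
  induction pre generalizing res with
  | nil => simp [mprods]
  | cons v pre ih =>
    by_cases hc : x + v + y = t
    · have hv : v = t - x - y := by omega
      subst hv
      simp only [mprods, List.filterMap_cons, if_pos hc, List.foldl_cons]
      rw [show List.filterMap _ pre = mprods t x y pre from rfl, ih]
      by_cases hm : (t - x - y) ∈ pre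
      · simp [hm]
      · simp [hm]
    · have hv : v ≠ t - x - y := by omega
      simp only [mprods, List.filterMap_cons, if_neg hc]
      rw [show List.filterMap _ pre = mprods t x y pre from rfl, ih]
      simp [List.mem_cons, Ne.symm hv]

-- B equals the fold of max over mtri -----------------------------------------
theorem altInner_eq (t x : Int) (ys : List Int) (seen : PySem.Set Int) (pre : List Int)
    (h : ∀ v : Int, v ∈ seen ↔ v ∈ pre) (res : Int) :
    altInner t x ys seen res = (minner t x pre ys).foldl max res := by
  induction ys generalizing seen pre res with
  | nil => simp [altInner, minner]
  | cons y ys ih =>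
    have hadd : ∀ v : Int, v ∈ seen.add y ↔ v ∈ pre ++ [y] := by
      intro v
      rw [PySem.Set.mem_add, h v, List.mem_append, List.mem_singleton]
    have hiff : seen.contains (t - x - y) = true ↔ (t - x - y) ∈ pre := by
      unfold PySem.Set.contains
      rw [List.contains_iff_mem]
      exact h _
    simp only [altInner, minner, List.foldl_append]
    rw [mprods_foldl]
    by_cases hm : (t - x - y) ∈ pre
    · rw [if_pos hm, if_pos (hiff.mpr hm), ih (seen.add y) (pre ++ [y]) hadd,
        show x * y * (t - x - y) = x * (t - x - y) * y by ring]
    · rw [if_neg hm, if_neg (fun hc => hm (hiff.mp hc))]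
      exact ih (seen.add y) (pre ++ [y]) hadd _

theorem altOuter_eq (t : Int) (l : List Int) (res : Int) :
    altOuter t l res = (mtri t l).foldl max res := by
  induction l generalizing res with
  | nil => simp [altOuter, mtri]
  | cons x rest ih =>
    simp only [altOuter, mtri, List.foldl_append]
    rw [altInner_eq t x rest PySem.Set.empty [] (by simp [PySem.Set.empty]) res, ih]

-- membership characterization of mtri ----------------------------------------
theorem mem_minner (t x u : Int) (ys : List Int) : ∀ pre : List Int,
    (u ∈ minner t x pre ys ↔
      ∃ v y, ((v ∈ pre ∧ y ∈ ys) ∨ List.Sublist [v, y] ys) ∧ x + v + y = t ∧ u = x * v * y) := by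
  induction ys with
  | nil =>
    intro pre
    simp only [minner, List.not_mem_nil]
    constructor
    · intro h; cases h
    · rintro ⟨v, y, hvy, -, -⟩
      rcases hvy with ⟨-, h⟩ | h
      · exact h
      · exact absurd h.length_le (by simp)
  | cons y0 ys ih =>
    intro pre
    simp only [minner, List.mem_append, mem_mprods, ih (pre ++ [y0])]
    constructor
    · rintro (⟨v, hv, hc, hu⟩ | ⟨v, y, hvy, hc, hu⟩)
      · exact ⟨v, y0, Or.inl ⟨hv, List.mem_cons_self⟩, hc, hu⟩
      · rcases hvy with ⟨hv, hy⟩ | hsub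
        · rcases hv with hv | hv
          · exact ⟨v, y, Or.inl ⟨hv, List.mem_cons_of_mem _ hy⟩, hc, hu⟩
          · have : v = y0 := by simpa using hv
            subst this
            exact ⟨v, y, Or.inr ((List.singleton_sublist.mpr hy).cons₂ v), hc, hu⟩
        · exact ⟨v, y, Or.inr (hsub.cons y0), hc, hu⟩
    · rintro ⟨v, y, hvy, hc, hu⟩
      rcases hvy with ⟨hv, hy⟩ | hsub
      · rcases List.mem_cons.mp hy with hy | hy
        · subst hy; exact Or.inl ⟨v, hv, hc, hu⟩
        · exact Or.inr ⟨v, y, Or.inl ⟨Or.inl hv, hy⟩, hc, hu⟩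
      · rcases List.cons_sublist_cons'.mp hsub with hsub' | ⟨hv, hy⟩
        · exact Or.inr ⟨v, y, Or.inr hsub', hc, hu⟩
        · subst hv
          exact Or.inr ⟨v, y, Or.inl ⟨by simp, List.singleton_sublist.mp hy⟩, hc, hu⟩

theorem mem_mtri (t u : Int) (l : List Int) :
    u ∈ mtri t l ↔ ∃ s : List Int, s.Sublist l ∧ s.length = 3 ∧ s.sum = t ∧ s.prod = u := by
  induction l with
  | nil =>
    constructor
    · intro h; cases h
    · rintro ⟨s, hs, h3, -, -⟩
      rw [List.sublist_nil.mp hs] at h3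
      simp at h3
  | cons x rest ih =>
    simp only [mtri, List.mem_append, mem_minner, ih]
    constructor
    · rintro (⟨v, y, hvy, hc, hu⟩ | ⟨s, hs, h3, hsum, hprod⟩)
      · rcases hvy with ⟨h, -⟩ | hsub
        · cases h
        · refine ⟨[x, v, y], hsub.cons₂ x, by simp, ?_, ?_⟩
          · simp only [List.sum_cons, List.sum_nil]; omega
          · simp only [List.prod_cons, List.prod_nil, hu]; ring
      · exact ⟨s, hs.cons x, h3, hsum, hprod⟩
    · rintro ⟨s, hs, h3, hsum, hprod⟩
      rcases List.sublist_cons_iff.mp hs with hs' | ⟨r, rfl, hr⟩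
      · exact Or.inr ⟨s, hs', h3, hsum, hprod⟩
      · match r, h3, hr, hsum, hprod with
        | [v, y], _, hr, hsum, hprod =>
          refine Or.inl ⟨v, y, Or.inr hr, ?_, ?_⟩
          · simp only [List.sum_cons, List.sum_nil] at hsum; omega
          · simp only [List.prod_cons, List.prod_nil] at hprod
            rw [← hprod]; ring

-- IsBest: characterizes the value both programs compute ----------------------
def IsBest (l : List Int) (t r : Int) : Prop :=
  0 ≤ r ∧ (r = 0 ∨ ∃ s : List Int, s.Sublist l ∧ s.length = 3 ∧ s.sum = t ∧ s.prod = r) ∧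
  (∀ s : List Int, s.Sublist l → s.length = 3 → s.sum = t → s.prod ≤ r)

theorem isBest_unique {l : List Int} {t r₁ r₂ : Int}
    (h₁ : IsBest l t r₁) (h₂ : IsBest l t r₂) : r₁ = r₂ := by
  obtain ⟨h10, h1e, h1a⟩ := h₁
  obtain ⟨h20, h2e, h2a⟩ := h₂
  apply le_antisymm
  · rcases h1e with h | ⟨s, hs, hl, hsum, hprod⟩
    · omega
    · exact hprod ▸ h2a s hs hl hsum
  · rcases h2e with h | ⟨s, hs, hl, hsum, hprod⟩
    · omega
    · exact hprod ▸ h1a s hs hl hsum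

theorem isBest_perm {l₁ l₂ : List Int} {t r : Int} (hp : l₁.Perm l₂)
    (h : IsBest l₁ t r) : IsBest l₂ t r := by
  obtain ⟨h0, he, ha⟩ := h
  refine ⟨h0, ?_, ?_⟩
  · rcases he with h | ⟨s, hs, hl, hsum, hprod⟩
    · exact Or.inl h
    · obtain ⟨s', hs'p, hs'⟩ := (List.Sublist.subperm hs).trans hp.subperm
      exact Or.inr ⟨s', hs', by rw [hs'p.length_eq, hl],
        by rw [hs'p.sum_eq, hsum], by rw [hs'p.prod_eq, hprod]⟩
  · intro s hs hl hsum
    obtain ⟨s', hs'p, hs'⟩ := (List.Sublist.subperm hs).trans hp.symm.subperm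
    calc s.prod = s'.prod := (hs'p.prod_eq).symm
    _ ≤ r := ha s' hs' (by rw [hs'p.length_eq, hl]) (by rw [hs'p.sum_eq, hsum])

theorem isBest_B (l : List Int) (t : Int) : IsBest l t (part_2_alt l t) := by
  have heq : part_2_alt l t = (mtri t l).foldl max 0 := altOuter_eq t l 0
  rw [heq]
  refine ⟨le_foldl_max _ _, ?_, ?_⟩
  · rcases foldl_max_eq_or (mtri t l) 0 with h | h
    · exact Or.inl h
    · exact Or.inr ((mem_mtri t _ l).mp h)
  · intro s hs hl hsum
    exact mem_le_foldl_max _ _ _ ((mem_mtri t s.prod l).mpr ⟨s, hs, hl, hsum, rfl⟩)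

-- A-side: the two-pointer loop -----------------------------------------------
theorem part2While_exit (s : List Int) (t i low high res : Int) (h : ¬ low < high) :
    part2While s t i low high res = res := by
  rw [part2While, if_neg h]

theorem part2While_step_eq (s : List Int) (t i low high res : Int) (h : low < high)
    (ht : PySem.List.pyGetD s i 0 + PySem.List.pyGetD s low 0 + PySem.List.pyGetD s high 0 = t) :
    part2While s t i low high res = part2While s t i (low + 1) (high - 1)
      (max res (PySem.List.pyGetD s i 0 * PySem.List.pyGetD s low 0 * PySem.List.pyGetD s high 0)) := by
  conv_lhs => rw [part2While]
  simp only [if_pos h, ht, if_true]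

theorem part2While_step_lt (s : List Int) (t i low high res : Int) (h : low < high)
    (hne : PySem.List.pyGetD s i 0 + PySem.List.pyGetD s low 0 + PySem.List.pyGetD s high 0 ≠ t)
    (hlt : PySem.List.pyGetD s i 0 + PySem.List.pyGetD s low 0 + PySem.List.pyGetD s high 0 < t) :
    part2While s t i low high res = part2While s t i (low + 1) high res := by
  conv_lhs => rw [part2While]
  simp only [if_pos h, if_neg hne, if_pos hlt]

theorem part2While_step_gt (s : List Int) (t i low high res : Int) (h : low < high)
    (hne : PySem.List.pyGetD s i 0 + PySem.List.pyGetD s low 0 + PySem.List.pyGetD s high 0 ≠ t)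
    (hge : ¬ PySem.List.pyGetD s i 0 + PySem.List.pyGetD s low 0 + PySem.List.pyGetD s high 0 < t) :
    part2While s t i low high res = part2While s t i low (high - 1) res := by
  conv_lhs => rw [part2While]
  simp only [if_pos h, if_neg hne, if_neg hge]

theorem part2While_spec (s : List Int) (t i : Int)
    (hmono : ∀ j k : Int, 0 ≤ j → j ≤ k → k < (s.length : Int) →
      PySem.List.pyGetD s j 0 ≤ PySem.List.pyGetD s k 0)
    (low high res : Int) (hlow : 0 ≤ low) (hhigh : high < (s.length : Int)) :
    res ≤ part2While s t i low high res ∧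
    (∀ j k : Int, low ≤ j → j < k → k ≤ high →
      PySem.List.pyGetD s i 0 + PySem.List.pyGetD s j 0 + PySem.List.pyGetD s k 0 = t →
      PySem.List.pyGetD s i 0 * PySem.List.pyGetD s j 0 * PySem.List.pyGetD s k 0 ≤
        part2While s t i low high res) ∧
    (part2While s t i low high res = res ∨
      ∃ j k : Int, low ≤ j ∧ j < k ∧ k ≤ high ∧
        PySem.List.pyGetD s i 0 + PySem.List.pyGetD s j 0 + PySem.List.pyGetD s k 0 = t ∧
        part2While s t i low high res =
          PySem.List.pyGetD s i 0 * PySem.List.pyGetD s j 0 * PySem.List.pyGetD s k 0) := by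
  by_cases hlh : low < high
  · by_cases ht : PySem.List.pyGetD s i 0 + PySem.List.pyGetD s low 0 + PySem.List.pyGetD s high 0 = t
    · obtain ⟨ih1, ih2, ih3⟩ := part2While_spec s t i hmono (low + 1) (high - 1)
        (max res (PySem.List.pyGetD s i 0 * PySem.List.pyGetD s low 0 * PySem.List.pyGetD s high 0))
        (by omega) (by omega)
      rw [part2While_step_eq s t i low high res hlh ht]
      refine ⟨le_trans (le_max_left _ _) ih1, ?_, ?_⟩
      · intro j k hj hjk hk hsum
        by_cases hjlow : j = low
        · subst hjlow
          by_cases hkhigh : k = high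
          · subst hkhigh
            exact le_trans (le_max_right _ _) ih1
          · have hvk : PySem.List.pyGetD s k 0 = PySem.List.pyGetD s high 0 := by omega
            rw [hvk]
            exact le_trans (le_max_right _ _) ih1
        · by_cases hkhigh : k = high
          · subst hkhigh
            have hvj : PySem.List.pyGetD s j 0 = PySem.List.pyGetD s low 0 := by omega
            rw [hvj]
            exact le_trans (le_max_right _ _) ih1
          · exact ih2 j k (by omega) hjk (by omega) hsum
      · rcases ih3 with h' | ⟨j, k, hj, hjk, hk, hsum, hR⟩
        · rcases max_choice res (PySem.List.pyGetD s i 0 * PySem.List.pyGetD s low 0 * PySem.List.pyGetD s high 0) with hm | hm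
          · exact Or.inl (h'.trans hm)
          · exact Or.inr ⟨low, high, le_refl low, hlh, le_refl high, ht, h'.trans hm⟩
        · exact Or.inr ⟨j, k, by omega, hjk, by omega, hsum, hR⟩
    · by_cases hlt : PySem.List.pyGetD s i 0 + PySem.List.pyGetD s low 0 + PySem.List.pyGetD s high 0 < t
      · obtain ⟨ih1, ih2, ih3⟩ := part2While_spec s t i hmono (low + 1) high res (by omega) hhigh
        rw [part2While_step_lt s t i low high res hlh ht hlt]
        refine ⟨ih1, ?_, ?_⟩
        · intro j k hj hjk hk hsum
          by_cases hjlow : j = low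
          · subst hjlow
            have hvk : PySem.List.pyGetD s k 0 ≤ PySem.List.pyGetD s high 0 :=
              hmono k high (by omega) hk hhigh
            exact absurd hsum (by omega)
          · exact ih2 j k (by omega) hjk hk hsum
        · rcases ih3 with h' | ⟨j, k, hj, hjk, hk, hsum, hR⟩
          · exact Or.inl h'
          · exact Or.inr ⟨j, k, by omega, hjk, hk, hsum, hR⟩
      · obtain ⟨ih1, ih2, ih3⟩ := part2While_spec s t i hmono low (high - 1) res hlow (by omega)
        rw [part2While_step_gt s t i low high res hlh ht hlt]
        refine ⟨ih1, ?_, ?_⟩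
        · intro j k hj hjk hk hsum
          by_cases hkhigh : k = high
          · subst hkhigh
            have hvj : PySem.List.pyGetD s low 0 ≤ PySem.List.pyGetD s j 0 :=
              hmono low j hlow hj (by omega)
            exact absurd hsum (by omega)
          · exact ih2 j k hj hjk (by omega) hsum
        · rcases ih3 with h' | ⟨j, k, hj, hjk, hk, hsum, hR⟩
          · exact Or.inl h'
          · exact Or.inr ⟨j, k, hj, hjk, by omega, hsum, hR⟩
  · rw [part2While_exit s t i low high res hlh]
    refine ⟨le_refl _, ?_, Or.inl rfl⟩
    intro j k hj hjk hk _
    exact absurd hjk (by omega)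
termination_by (high - low).toNat
decreasing_by all_goals omega

theorem part2Outer_spec (s : List Int) (t : Int)
    (hmono : ∀ j k : Int, 0 ≤ j → j ≤ k → k < (s.length : Int) →
      PySem.List.pyGetD s j 0 ≤ PySem.List.pyGetD s k 0)
    (a res : Int) (ha : 0 ≤ a) :
    res ≤ part2Outer s t (s.length : Int) (PySem.List.pyRange a (s.length : Int)) res ∧
    (∀ i j k : Int, a ≤ i → i < j → j < k → k < (s.length : Int) →
      PySem.List.pyGetD s i 0 + PySem.List.pyGetD s j 0 + PySem.List.pyGetD s k 0 = t →
      PySem.List.pyGetD s i 0 * PySem.List.pyGetD s j 0 * PySem.List.pyGetD s k 0 ≤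
        part2Outer s t (s.length : Int) (PySem.List.pyRange a (s.length : Int)) res) ∧
    (part2Outer s t (s.length : Int) (PySem.List.pyRange a (s.length : Int)) res = res ∨
      ∃ i j k : Int, a ≤ i ∧ i < j ∧ j < k ∧ k < (s.length : Int) ∧
        PySem.List.pyGetD s i 0 + PySem.List.pyGetD s j 0 + PySem.List.pyGetD s k 0 = t ∧
        part2Outer s t (s.length : Int) (PySem.List.pyRange a (s.length : Int)) res =
          PySem.List.pyGetD s i 0 * PySem.List.pyGetD s j 0 * PySem.List.pyGetD s k 0) := by
  by_cases haL : a < (s.length : Int)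
  · rw [PySem.List.pyRange_one_cons haL]
    by_cases hbreak : a + 1 ≥ (s.length : Int)
    · simp only [part2Outer, if_pos hbreak]
      refine ⟨le_refl _, ?_, Or.inl trivial⟩
      intro i j k hi hij hjk hkL _
      exact absurd hjk (by omega)
    · simp only [part2Outer, if_neg hbreak]
      obtain ⟨w1, w2, w3⟩ := part2While_spec s t a hmono (a + 1) ((s.length : Int) - 1) res
        (by omega) (by omega)
      obtain ⟨ih1, ih2, ih3⟩ := part2Outer_spec s t hmono (a + 1)
        (part2While s t a (a + 1) ((s.length : Int) - 1) res) (by omega)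
      refine ⟨le_trans w1 ih1, ?_, ?_⟩
      · intro i j k hi hij hjk hkL hsum
        by_cases hia : i = a
        · subst hia
          exact le_trans (w2 j k (by omega) hjk (by omega) hsum) ih1
        · exact ih2 i j k (by omega) hij hjk hkL hsum
      · rcases ih3 with h' | ⟨i, j, k, hi, hij, hjk, hkL, hsum, hR⟩
        · rcases w3 with h'' | ⟨j, k, hj, hjk, hk, hsum, hW⟩
          · exact Or.inl (h'.trans h'')
          · exact Or.inr ⟨a, j, k, le_refl a, by omega, hjk, by omega, hsum, h'.trans hW⟩
        · exact Or.inr ⟨i, j, k, by omega, hij, hjk, hkL, hsum, hR⟩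
  · rw [PySem.List.pyRange_one_eq_nil (by omega)]
    refine ⟨le_refl _, ?_, Or.inl rfl⟩
    intro i j k hi hij hjk hkL _
    exact absurd hij (by omega)
termination_by ((s.length : Int) - a).toNat
decreasing_by omega

theorem isBest_A (entries : List Int) (t : Int) :
    IsBest (PySem.List.sorted entries (fun x => x) false) t (part_2 entries t) := by
  have hmono : ∀ j k : Int, 0 ≤ j → j ≤ k →
      k < ((PySem.List.sorted entries (fun x => x) false).length : Int) →
      PySem.List.pyGetD (PySem.List.sorted entries (fun x => x) false) j 0 ≤
        PySem.List.pyGetD (PySem.List.sorted entries (fun x => x) false) k 0 := by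
    intro j k h0j hjk hk
    have h0k : 0 ≤ k := le_trans h0j hjk
    rw [PySem.List.pyGetD_eq_getElem _ 0 h0j (by omega),
      PySem.List.pyGetD_eq_getElem _ 0 h0k (by omega)]
    exact PySem.List.sorted_id_getElem_mono entries (by omega) (by omega)
  have hpart : part_2 entries t = part2Outer (PySem.List.sorted entries (fun x => x) false) t
      ((PySem.List.sorted entries (fun x => x) false).length : Int)
      (PySem.List.pyRange 0 ((PySem.List.sorted entries (fun x => x) false).length : Int)) 0 := rfl
  obtain ⟨h0R, hall, hex⟩ :=
    part2Outer_spec (PySem.List.sorted entries (fun x => x) false) t hmono 0 0 (le_refl 0)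
  rw [hpart]
  refine ⟨h0R, ?_, ?_⟩
  · rcases hex with h | ⟨i, j, k, h0i, hij, hjk, hkL, hsum, hR⟩
    · exact Or.inl h
    · right
      have hin : i.toNat < (PySem.List.sorted entries (fun x => x) false).length := by omega
      have hjn : j.toNat < (PySem.List.sorted entries (fun x => x) false).length := by omega
      have hkn : k.toNat < (PySem.List.sorted entries (fun x => x) false).length := by omega
      have e1 : PySem.List.pyGetD (PySem.List.sorted entries (fun x => x) false) i 0 =
          (PySem.List.sorted entries (fun x => x) false)[i.toNat] :=
        PySem.List.pyGetD_eq_getElem _ 0 h0i (by omega)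
      have e2 : PySem.List.pyGetD (PySem.List.sorted entries (fun x => x) false) j 0 =
          (PySem.List.sorted entries (fun x => x) false)[j.toNat] :=
        PySem.List.pyGetD_eq_getElem _ 0 (by omega) (by omega)
      have e3 : PySem.List.pyGetD (PySem.List.sorted entries (fun x => x) false) k 0 =
          (PySem.List.sorted entries (fun x => x) false)[k.toNat] :=
        PySem.List.pyGetD_eq_getElem _ 0 (by omega) (by omega)
      refine ⟨[(PySem.List.sorted entries (fun x => x) false)[i.toNat],
        (PySem.List.sorted entries (fun x => x) false)[j.toNat],
        (PySem.List.sorted entries (fun x => x) false)[k.toNat]], ?_, by simp, ?_, ?_⟩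
      · have hsub := List.map_getElem_sublist (l := PySem.List.sorted entries (fun x => x) false)
          (is := [⟨i.toNat, hin⟩, ⟨j.toNat, hjn⟩, ⟨k.toNat, hkn⟩])
          (by refine List.Pairwise.cons ?_ (List.Pairwise.cons ?_ (List.pairwise_singleton _ _))
              · intro x hx
                simp only [List.mem_cons, List.not_mem_nil, or_false] at hx
                rcases hx with rfl | rfl <;> exact Fin.mk_lt_mk.mpr (by omega)
              · intro x hx
                simp only [List.mem_cons, List.not_mem_nil, or_false] at hx
                rcases hx with rfl
                exact Fin.mk_lt_mk.mpr (by omega))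
        simpa using hsub
      · simp only [List.sum_cons, List.sum_nil]
        rw [← e1, ← e2, ← e3]
        omega
      · simp only [List.prod_cons, List.prod_nil]
        rw [← e1, ← e2, ← e3, hR]
        ring
  · intro s3 hsub h3 hsum
    obtain ⟨is, hmap, hpw⟩ := List.sublist_eq_map_getElem hsub
    have hlen : is.length = 3 := by
      have hl := congrArg List.length hmap
      simp only [List.length_map] at hl
      omega
    match is, hlen, hmap, hpw with
    | [fi, fj, fk], _, hmap, hpw =>
      simp only [List.map_cons, List.map_nil, Fin.getElem_fin] at hmap
      simp only [List.pairwise_cons, List.mem_cons, List.not_mem_nil, Fin.lt_def] at hpw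
      have hij : (fi : Nat) < (fj : Nat) := by
        have := hpw.1 fj (Or.inl rfl); exact this
      have hjk : (fj : Nat) < (fk : Nat) := by
        have := hpw.2.1 fk (Or.inl rfl); exact this
      have e1 : PySem.List.pyGetD (PySem.List.sorted entries (fun x => x) false) ((fi : Nat) : Int) 0 =
          (PySem.List.sorted entries (fun x => x) false)[(fi : Nat)] := by
        rw [PySem.List.pyGetD_natCast]
        exact List.getD_eq_getElem _ _ fi.isLt
      have e2 : PySem.List.pyGetD (PySem.List.sorted entries (fun x => x) false) ((fj : Nat) : Int) 0 =
          (PySem.List.sorted entries (fun x => x) false)[(fj : Nat)] := by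
        rw [PySem.List.pyGetD_natCast]
        exact List.getD_eq_getElem _ _ fj.isLt
      have e3 : PySem.List.pyGetD (PySem.List.sorted entries (fun x => x) false) ((fk : Nat) : Int) 0 =
          (PySem.List.sorted entries (fun x => x) false)[(fk : Nat)] := by
        rw [PySem.List.pyGetD_natCast]
        exact List.getD_eq_getElem _ _ fk.isLt
      rw [hmap] at hsum
      simp only [List.sum_cons, List.sum_nil, add_zero] at hsum
      have hmain := hall ((fi : Nat) : Int) ((fj : Nat) : Int) ((fk : Nat) : Int)
        (Int.natCast_nonneg _) (by exact_mod_cast hij) (by exact_mod_cast hjk)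
        (by exact_mod_cast fk.isLt)
        (by rw [e1, e2, e3]; omega)
      rw [e1, e2, e3] at hmain
      rw [hmap]
      simp only [List.prod_cons, List.prod_nil, mul_one]
      calc (PySem.List.sorted entries (fun x => x) false)[(fi : Nat)] *
            ((PySem.List.sorted entries (fun x => x) false)[(fj : Nat)] *
              (PySem.List.sorted entries (fun x => x) false)[(fk : Nat)]) =
          (PySem.List.sorted entries (fun x => x) false)[(fi : Nat)] *
            (PySem.List.sorted entries (fun x => x) false)[(fj : Nat)] *
            (PySem.List.sorted entries (fun x => x) false)[(fk : Nat)] := by ring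
        _ ≤ _ := hmain

-- ===== VERDICT (by name: the statement is the Claim_ definition above) =====
theorem part_2_spec : Claim_equal_part_2 := by
  intro entries target _
  unfold Spec_part_2
  have hA := isBest_A entries target
  have hA' : IsBest entries target (part_2 entries target) :=
    isBest_perm (PySem.List.sorted_perm entries (fun x => x) false) hA
  exact isBest_unique hA' (isBest_B entries target)
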